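-- pv_equiv track=rewrite | github.com/mikelmyers/primordia-experiments | experiments/rule-world/world_structured.py | active_roles_for_scenario
-- ===== SOURCE A (Python) =====
-- def active_roles_for_scenario(facts: list[str]) -> set[str]:
--     """Pick roles whose semantic category is relevant given the fact set.
--
--     The mapping is small and explicit. Adding a new role here is the only
--     domain-specific knowledge the role-weighted abstractor consumes.
--     """
--     roles: set[str] = set()
--     fact_set = set(facts)
--     if any(f.startswith("hearth_") or "fire" in f for f in fact_set):
--         roles.add("fire_relevant")
--     if any("cold" in f or "warm" in f for f in fact_set):
--         roles.add("temperature_relevant")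
--     if any("hung" in f or "food" in f for f in fact_set):
--         roles.add("nutritional")
--     if any("wound" in f or "ill" in f or "heal" in f for f in fact_set):
--         roles.add("medicinal")
--     return roles
-- ===== SOURCE B (Python) =====
-- def active_roles_for_scenario(facts: list[str]) -> set[str]:
--     """Pick roles whose semantic category is relevant given the fact set.
--
--     Single pass: one loop over the facts maintains all four role flags at
--     once, then the role set is assembled from the flags.
--     """
--     fire = temp = nutr = med = False
--     for f in facts:
--         if f.startswith("hearth_") or "fire" in f:
--             fire = True
--         if "cold" in f or "warm" in f:
--             temp = True
--         if "hung" in f or "food" in f: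
--             nutr = True
--         if "wound" in f or "ill" in f or "heal" in f:
--             med = True
--     roles: set[str] = set()
--     if fire:
--         roles.add("fire_relevant")
--     if temp:
--         roles.add("temperature_relevant")
--     if nutr:
--         roles.add("nutritional")
--     if med:
--         roles.add("medicinal")
--     return roles
-- ===== Notes on version B (the rewrite author's own statement) =====
-- stated objective: alternative
-- what changed: A deduplicates the facts and runs four independent any-scans over the set; B makes one pass over the facts list maintaining four boolean role flags and assembles the role set from the flags.
import Mathlib
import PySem

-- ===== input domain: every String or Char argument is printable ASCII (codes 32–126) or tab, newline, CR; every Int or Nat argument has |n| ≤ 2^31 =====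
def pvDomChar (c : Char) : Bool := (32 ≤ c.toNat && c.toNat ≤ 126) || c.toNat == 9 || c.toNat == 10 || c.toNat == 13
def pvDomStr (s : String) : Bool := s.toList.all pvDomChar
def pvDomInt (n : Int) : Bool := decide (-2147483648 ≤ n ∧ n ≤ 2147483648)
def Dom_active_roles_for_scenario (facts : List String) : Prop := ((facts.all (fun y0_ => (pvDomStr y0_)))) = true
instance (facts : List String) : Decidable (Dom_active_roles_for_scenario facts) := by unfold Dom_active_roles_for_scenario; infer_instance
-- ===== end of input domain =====

-- B replaces A's four independent any-scans over set(facts) by one pass over the facts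
-- maintaining four boolean flags ("alternative" objective); return values are equal as sets.

-- ===== PORT A =====
-- the four membership tests of A, as predicates on one fact
def pvFireP (f : String) : Bool := PySem.Str.startswith f "hearth_" || PySem.Str.isIn "fire" f
def pvTempP (f : String) : Bool := PySem.Str.isIn "cold" f || PySem.Str.isIn "warm" f
def pvNutrP (f : String) : Bool := PySem.Str.isIn "hung" f || PySem.Str.isIn "food" f
def pvMedP  (f : String) : Bool := PySem.Str.isIn "wound" f || PySem.Str.isIn "ill" f || PySem.Str.isIn "heal" f

def active_roles_for_scenario (facts : List String) : List String :=
  let roles : PySem.Set String := PySem.Set.empty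
  let fact_set : PySem.Set String := PySem.Set.ofList facts
  let roles := if fact_set.any pvFireP then PySem.Set.add roles "fire_relevant" else roles
  let roles := if fact_set.any pvTempP then PySem.Set.add roles "temperature_relevant" else roles
  let roles := if fact_set.any pvNutrP then PySem.Set.add roles "nutritional" else roles
  let roles := if fact_set.any pvMedP then PySem.Set.add roles "medicinal" else roles
  roles

-- ===== PORT B =====
def active_roles_for_scenario_alt (facts : List String) : List String :=
  let flags := facts.foldl
    (fun (st : Bool × Bool × Bool × Bool) f =>
      (st.1 || pvFireP f, st.2.1 || pvTempP f, st.2.2.1 || pvNutrP f, st.2.2.2 || pvMedP f))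
    (false, false, false, false)
  let roles : PySem.Set String := PySem.Set.empty
  let roles := if flags.1 then PySem.Set.add roles "fire_relevant" else roles
  let roles := if flags.2.1 then PySem.Set.add roles "temperature_relevant" else roles
  let roles := if flags.2.2.1 then PySem.Set.add roles "nutritional" else roles
  let roles := if flags.2.2.2 then PySem.Set.add roles "medicinal" else roles
  roles

-- ===== PRECONDITION & SPEC =====
def Spec_active_roles_for_scenario (facts : List String) (out : List String) : Prop := out = active_roles_for_scenario_alt facts
instance (facts : List String) (out : List String) : Decidable (Spec_active_roles_for_scenario facts out) := by unfold Spec_active_roles_for_scenario; infer_instance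

-- ===== CLAIM (what is proved, stated in full; the proofs are below) =====
def Claim_equal_active_roles_for_scenario : Prop := ∀ (facts : List String), Dom_active_roles_for_scenario facts → Spec_active_roles_for_scenario facts (active_roles_for_scenario facts)

-- ===== LEMMAS AND PROOFS =====

-- any over the deduplicated set equals any over the original list
theorem pv_any_ofList (l : List String) (p : String → Bool) :
    (PySem.Set.ofList l).any p = l.any p := by
  rw [Bool.eq_iff_iff]
  simp only [List.any_eq_true, PySem.Set.mem_ofList]

-- B's one-pass fold computes the four any-flags
theorem pv_fold_flags (l : List String) (a b c d : Bool) :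
    l.foldl (fun (st : Bool × Bool × Bool × Bool) f =>
      (st.1 || pvFireP f, st.2.1 || pvTempP f, st.2.2.1 || pvNutrP f, st.2.2.2 || pvMedP f))
      (a, b, c, d)
    = (a || l.any pvFireP, b || l.any pvTempP, c || l.any pvNutrP, d || l.any pvMedP) := by
  induction l generalizing a b c d with
  | nil => simp
  | cons x xs ih => simp [ih, Bool.or_assoc]

-- ===== VERDICT (by name: the statement is the Claim_ definition above) =====
theorem active_roles_for_scenario_spec : Claim_equal_active_roles_for_scenario := by
  intro facts _
  show active_roles_for_scenario facts = active_roles_for_scenario_alt facts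
  unfold active_roles_for_scenario active_roles_for_scenario_alt
  simp only [pv_fold_flags, pv_any_ofList, Bool.false_or]
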